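-- pv_equiv track=rewrite | github.com/fab-geocommuns/RNB-coeur | app/batid/utils/misc.py | ext_ids_equal
-- ===== SOURCE A (Python) =====
-- def ext_ids_equal(ext_ids1: list[dict], ext_ids2: list[dict]) -> bool:
--
--     if not isinstance(ext_ids1, list) or not isinstance(ext_ids2, list):
--         return False
--     if len(ext_ids1) != len(ext_ids2):
--         return False
--
--     def _ext_id_to_str(ext_id: dict) -> str:
--         return f"{ext_id.get('source', '')}//{ext_id.get('id', '')}//{ext_id.get('source_version', '')}//{ext_id.get('created_at', '')}"
--
--     ext_ids1_str = sorted(_ext_id_to_str(ext_id) for ext_id in ext_ids1)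
--     ext_ids2_str = sorted(_ext_id_to_str(ext_id) for ext_id in ext_ids2)
--
--     return ext_ids1_str == ext_ids2_str
-- ===== SOURCE B (Python) =====
-- def ext_ids_equal(ext_ids1: list[dict], ext_ids2: list[dict]) -> bool:
--
--     if not isinstance(ext_ids1, list) or not isinstance(ext_ids2, list):
--         return False
--     if len(ext_ids1) != len(ext_ids2):
--         return False
--
--     def _ext_id_to_str(ext_id: dict) -> str:
--         return f"{ext_id.get('source', '')}//{ext_id.get('id', '')}//{ext_id.get('source_version', '')}//{ext_id.get('created_at', '')}"
--
--     pool = [_ext_id_to_str(ext_id) for ext_id in ext_ids2]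
--     for ext_id in ext_ids1:
--         s = _ext_id_to_str(ext_id)
--         try:
--             pool.remove(s)
--         except ValueError:
--             return False
--     return True
-- ===== Notes on version B (the rewrite author's own statement) =====
-- stated objective: alternative
-- what changed: Replaces sort-both-lists-and-compare with greedy multiset matching: serialize ext_ids2 into a working pool and remove the first matching serialization of each element of ext_ids1, failing fast on a missing match.
import Mathlib
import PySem

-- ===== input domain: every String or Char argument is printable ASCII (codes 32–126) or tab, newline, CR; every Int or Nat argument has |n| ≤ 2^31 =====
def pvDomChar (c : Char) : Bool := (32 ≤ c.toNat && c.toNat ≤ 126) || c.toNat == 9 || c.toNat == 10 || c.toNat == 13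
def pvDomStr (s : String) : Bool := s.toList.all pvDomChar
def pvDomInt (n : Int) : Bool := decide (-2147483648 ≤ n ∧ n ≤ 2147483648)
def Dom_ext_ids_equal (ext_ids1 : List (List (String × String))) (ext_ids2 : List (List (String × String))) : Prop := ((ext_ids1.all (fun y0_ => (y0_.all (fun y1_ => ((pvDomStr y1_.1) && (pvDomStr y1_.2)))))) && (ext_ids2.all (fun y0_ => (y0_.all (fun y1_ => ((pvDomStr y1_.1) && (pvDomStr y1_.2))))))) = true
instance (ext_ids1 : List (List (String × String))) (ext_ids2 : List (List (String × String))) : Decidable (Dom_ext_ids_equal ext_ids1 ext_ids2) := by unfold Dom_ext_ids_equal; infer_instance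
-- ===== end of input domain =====

-- B replaces sort-both-and-compare with greedy first-match removal from a working pool (alternative decomposition, same return value).

-- ===== PORT A =====
-- _ext_id_to_str: dict.get(k, '') is first-match lookup on the association list
def extIdToStr (d : List (String × String)) : String :=
  ((d.lookup "source").getD "") ++ "//" ++ ((d.lookup "id").getD "") ++ "//"
    ++ ((d.lookup "source_version").getD "") ++ "//" ++ ((d.lookup "created_at").getD "")

def ext_ids_equal (ext_ids1 : List (List (String × String))) (ext_ids2 : List (List (String × String))) : Bool :=
  -- isinstance guards are always satisfied at this type
  if ext_ids1.length ≠ ext_ids2.length then false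
  else
    PySem.List.sorted (ext_ids1.map extIdToStr) (fun s => s) false
      == PySem.List.sorted (ext_ids2.map extIdToStr) (fun s => s) false

-- ===== PORT B =====
-- the for-loop of Source B: pool.remove(s) (ValueError → return False)
def matchPool : List String → List String → Bool
  | [], _ => true
  | s :: rest, pool =>
    match PySem.List.remove? pool s with
    | none => false
    | some pool' => matchPool rest pool'

def ext_ids_equal_alt (ext_ids1 : List (List (String × String))) (ext_ids2 : List (List (String × String))) : Bool :=
  if ext_ids1.length ≠ ext_ids2.length then false
  else matchPool (ext_ids1.map extIdToStr) (ext_ids2.map extIdToStr)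

-- ===== PRECONDITION & SPEC =====
def Spec_ext_ids_equal (ext_ids1 : List (List (String × String))) (ext_ids2 : List (List (String × String))) (out : Bool) : Prop := out = ext_ids_equal_alt ext_ids1 ext_ids2
instance (ext_ids1 : List (List (String × String))) (ext_ids2 : List (List (String × String))) (out : Bool) : Decidable (Spec_ext_ids_equal ext_ids1 ext_ids2 out) := by unfold Spec_ext_ids_equal; infer_instance

-- ===== CLAIM (what is proved, stated in full; the proofs are below) =====
def Claim_equal_ext_ids_equal : Prop := ∀ (ext_ids1 : List (List (String × String))) (ext_ids2 : List (List (String × String))), Dom_ext_ids_equal ext_ids1 ext_ids2 → Spec_ext_ids_equal ext_ids1 ext_ids2 (ext_ids_equal ext_ids1 ext_ids2)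

-- ===== LEMMAS AND PROOFS =====
theorem matchPool_iff_subperm (a b : List String) : matchPool a b = true ↔ a.Subperm b := by
  induction a generalizing b with
  | nil => simp [matchPool, List.nil_subperm]
  | cons s rest ih =>
    by_cases h : s ∈ b
    · rw [matchPool, PySem.List.remove?_eq_some_erase b s h, ih]
      have hperm : b.Perm (s :: b.erase s) := List.perm_cons_erase h
      rw [hperm.subperm_left, List.subperm_cons]
    · rw [matchPool, (PySem.List.remove?_eq_none_iff b s).mpr h]
      simp only [Bool.false_eq_true, false_iff]
      exact fun hs => h (hs.subset (List.mem_cons_self ..))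

theorem matchPool_eq_sorted (a b : List String) (hl : a.length = b.length) :
    (PySem.List.sorted a (fun s => s) false == PySem.List.sorted b (fun s => s) false)
      = matchPool a b := by
  rw [Bool.eq_iff_iff, beq_iff_eq, PySem.List.sorted_id_eq_sorted_id_iff_perm, matchPool_iff_subperm]
  exact ⟨List.Perm.subperm, fun hs => hs.perm_of_length_le (le_of_eq hl.symm)⟩

-- ===== VERDICT (by name: the statement is the Claim_ definition above) =====
theorem ext_ids_equal_spec : Claim_equal_ext_ids_equal := by
  intro l1 l2 _
  unfold Spec_ext_ids_equal ext_ids_equal ext_ids_equal_alt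
  by_cases hl : l1.length = l2.length
  · simp only [hl, ne_eq, not_true_eq_false, if_false]
    exact matchPool_eq_sorted _ _ (by simp [hl])
  · simp [hl]
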